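-- pv_equiv track=rewrite | github.com/FisherXZ/lead-gen-agent | agent/src/runtime/compactor.py | _extract_timeline
-- ===== SOURCE A (Python) =====
-- def _format_summary(summary: str) -> str:
--     """Convert <summary>...</summary> XML to plain readable text.
--
--     Strips the XML tags and prepends 'Summary:\\n'.
--     Falls back to returning the string as-is if tags aren't present.
--     """
--     if "<summary>" in summary and "</summary>" in summary:
--         start = summary.find("<summary>") + len("<summary>")
--         end = summary.find("</summary>")
--         inner = summary[start:end].strip()
--         return "Summary:\n" + inner
--     return summary.strip()
--
-- def _extract_timeline(summary: str) -> list[str]: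
--     """Return the timeline lines from a summary string."""
--     formatted = _format_summary(summary)
--     lines: list[str] = []
--     in_timeline = False
--     for line in formatted.splitlines():
--         stripped = line.rstrip()
--         if stripped == "- Key timeline:":
--             in_timeline = True
--             continue
--         if not in_timeline:
--             continue
--         if not stripped:
--             break
--         lines.append(stripped)
--     return lines
-- ===== SOURCE B (Python) =====
-- def _format_summary(summary: str) -> str:
--     if "<summary>" in summary and "</summary>" in summary:
--         start = summary.find("<summary>") + len("<summary>")
--         end = summary.find("</summary>")
--         inner = summary[start:end].strip()
--         return "Summary:\n" + inner
--     return summary.strip()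
--
-- def _extract_timeline(summary: str) -> list[str]:
--     marker = "- Key timeline:"
--     lines = [l.rstrip() for l in _format_summary(summary).splitlines()]
--     try:
--         i = lines.index(marker)
--     except ValueError:
--         return []
--     rest = lines[i + 1:]
--     try:
--         rest = rest[:rest.index("")]
--     except ValueError:
--         pass
--     return [s for s in rest if s != marker]
-- ===== Notes on version B (the rewrite author's own statement) =====
-- stated objective: simpler
-- what changed: Replaces the stateful in_timeline-flag loop with a locate-then-cut decomposition: rstrip all lines once, find the first marker line with list.index, slice up to the first blank line after it, and filter out repeated marker lines.
import Mathlib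
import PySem

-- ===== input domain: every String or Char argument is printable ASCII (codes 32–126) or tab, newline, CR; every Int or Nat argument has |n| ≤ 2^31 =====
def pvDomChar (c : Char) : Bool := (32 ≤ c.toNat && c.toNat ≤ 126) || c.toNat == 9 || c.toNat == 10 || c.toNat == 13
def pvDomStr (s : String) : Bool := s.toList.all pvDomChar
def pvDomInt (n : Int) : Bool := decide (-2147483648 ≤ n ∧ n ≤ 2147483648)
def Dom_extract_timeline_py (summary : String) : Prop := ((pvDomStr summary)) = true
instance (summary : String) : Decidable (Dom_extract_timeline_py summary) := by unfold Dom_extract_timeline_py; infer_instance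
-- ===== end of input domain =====

-- B replaces A's stateful in_timeline flag by locate-the-marker, cut at the first blank line, filter out marker lines (objective: simpler).

-- ===== PORT A =====
-- _format_summary, transliterated (the string concatenation "Summary:\n" + inner is done on the char lists, exact)
def pvFmtA (summary : String) : String :=
  if PySem.Str.isIn "<summary>" summary && PySem.Str.isIn "</summary>" summary then
    let start := PySem.Str.find summary "<summary>" + 9
    let e := PySem.Str.find summary "</summary>"
    let inner := PySem.Str.strip (PySem.Str.slice summary (some start) (some e))
    String.ofList ("Summary:\n".toList ++ inner.toList)
  else PySem.Str.strip summary

-- the for-loop of _extract_timeline, with in_timeline as a parameter; 'break' returns acc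
def pvALoop (lines acc : List String) (inT : Bool) : List String :=
  match lines with
  | [] => acc
  | l :: rest =>
    let s := PySem.Str.rstrip l
    if s = "- Key timeline:" then pvALoop rest acc true
    else if !inT then pvALoop rest acc inT
    else if s = "" then acc
    else pvALoop rest (acc ++ [s]) inT

def extract_timeline_py (summary : String) : List String :=
  pvALoop (PySem.Str.splitlines (pvFmtA summary)) [] false

-- ===== PORT B =====
-- Source B keeps _format_summary verbatim, so its port shares pvFmtA
-- locate marker (lines.index, None on ValueError), slice past it, cut at the first blank, filter markers
def extract_timeline_py_alt (summary : String) : List String :=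
  let marker := "- Key timeline:"
  let lines := (PySem.Str.splitlines (pvFmtA summary)).map PySem.Str.rstrip
  match PySem.List.index? lines marker with
  | none => []
  | some i =>
    let rest := PySem.List.slice lines (some ((i : Int) + 1)) none
    let rest2 :=
      match PySem.List.index? rest "" with
      | some j => PySem.List.slice rest none (some (j : Int))
      | none => rest
    rest2.filter (fun s => s ≠ marker)

-- ===== PRECONDITION & SPEC =====
def Spec_extract_timeline_py (summary : String) (out : List String) : Prop := out = extract_timeline_py_alt summary
instance (summary : String) (out : List String) : Decidable (Spec_extract_timeline_py summary out) := by unfold Spec_extract_timeline_py; infer_instance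

-- ===== CLAIM (what is proved, stated in full; the proofs are below) =====
def Claim_equal_extract_timeline_py : Prop := ∀ (summary : String), Dom_extract_timeline_py summary → Spec_extract_timeline_py summary (extract_timeline_py summary)

-- ===== LEMMAS AND PROOFS =====

-- B's cut-at-first-blank-then-filter, as a total function of the rstripped lines
def pvCut (ms : List String) : List String :=
  (ms.take ((PySem.List.index? ms "").getD ms.length)).filter (fun s => s ≠ "- Key timeline:")

theorem pvCut_cons_marker (ms : List String) : pvCut ("- Key timeline:" :: ms) = pvCut ms := by
  unfold pvCut
  rw [PySem.List.index?_cons_of_ne ms (by decide)]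
  cases h : PySem.List.index? ms "" with
  | none => simp
  | some j => simp

theorem pvCut_cons_blank (ms : List String) : pvCut ("" :: ms) = [] := by
  unfold pvCut
  rw [PySem.List.index?_cons_self]
  simp

theorem pvCut_cons (s : String) (ms : List String) (hM : s ≠ "- Key timeline:") (hE : s ≠ "") :
    pvCut (s :: ms) = s :: pvCut ms := by
  unfold pvCut
  rw [PySem.List.index?_cons_of_ne (x := s) (v := "") ms hE]
  cases h : PySem.List.index? ms "" with
  | none => simp [hM]
  | some j => simp [hM]

-- the loop with in_timeline = True appends exactly pvCut of the rstripped remainder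
theorem pvALoop_true (ls : List String) (acc : List String) :
    pvALoop ls acc true = acc ++ pvCut (ls.map PySem.Str.rstrip) := by
  induction ls generalizing acc with
  | nil => simp [pvALoop, pvCut, PySem.List.index?]
  | cons l rest ih =>
    simp only [pvALoop, List.map_cons]
    by_cases hM : PySem.Str.rstrip l = "- Key timeline:"
    · rw [if_pos hM, hM, pvCut_cons_marker, ih]
    · rw [if_neg hM]
      by_cases hE : PySem.Str.rstrip l = ""
      · rw [hE]
        simp only [Bool.not_true, Bool.false_eq_true, if_false, if_true, pvCut_cons_blank,
          List.append_nil]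
      · simp only [Bool.not_true, Bool.false_eq_true, if_false, if_neg hE, ih,
          pvCut_cons _ _ hM hE, List.append_assoc, List.singleton_append]

-- the loop with in_timeline = False: nothing until the first marker line, then pvCut of what follows
theorem pvALoop_false (ls : List String) (acc : List String) :
    pvALoop ls acc false =
      acc ++ (match PySem.List.index? (ls.map PySem.Str.rstrip) "- Key timeline:" with
              | none => []
              | some i => pvCut ((ls.map PySem.Str.rstrip).drop (i + 1))) := by
  induction ls generalizing acc with
  | nil => simp [pvALoop, PySem.List.index?]
  | cons l rest ih =>
    simp only [pvALoop, List.map_cons]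
    by_cases hM : PySem.Str.rstrip l = "- Key timeline:"
    · rw [if_pos hM, hM, PySem.List.index?_cons_self, pvALoop_true]
      simp
    · rw [if_neg hM,
        PySem.List.index?_cons_of_ne (x := PySem.Str.rstrip l) (v := "- Key timeline:") _ hM]
      simp only [Bool.not_false, if_true, ih]
      cases h : PySem.List.index? (rest.map PySem.Str.rstrip) "- Key timeline:" with
      | none => simp
      | some i => simp [List.drop_succ_cons]

-- ===== VERDICT (by name: the statement is the Claim_ definition above) =====
theorem extract_timeline_py_spec : Claim_equal_extract_timeline_py := by
  intro summary _
  unfold Spec_extract_timeline_py extract_timeline_py extract_timeline_py_alt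
  rw [pvALoop_false]
  cases h : PySem.List.index?
      ((PySem.Str.splitlines (pvFmtA summary)).map PySem.Str.rstrip) "- Key timeline:" with
  | none => simp only [h, List.nil_append]
  | some i =>
    simp only [h, List.nil_append]
    rw [show ((i : Int) + 1) = ((i + 1 : Nat) : Int) by push_cast; ring,
      PySem.List.slice_from_natCast]
    cases h2 : PySem.List.index?
        (((PySem.Str.splitlines (pvFmtA summary)).map PySem.Str.rstrip).drop (i + 1)) "" with
    | none => simp only [Option.getD]; unfold pvCut; rw [h2]; simp only [Option.getD_none]; rw [List.take_of_length_le (by simp)]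
    | some j => simp only [Option.getD]; unfold pvCut; rw [h2, PySem.List.slice_to_natCast]; rfl
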